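-- pv_equiv track=rewrite | github.com/NVIDIA-NeMo/Curator | fern/scripts/convert_curator_specific.py | escape_mdx_curly_braces
-- ===== SOURCE A (Python) =====
-- def escape_mdx_curly_braces(content: str) -> str:
--     """Escape {variable} in code blocks so MDX doesn't parse as JSX."""
--     # Common patterns that break MDX
--     replacements = [
--         ("{overrides}", "\\{overrides\\}"),
--         ("{config}", "\\{config\\}"),
--     ]
--     for old, new in replacements:
--         content = content.replace(old, new)
--     return content
-- ===== SOURCE B (Python) =====
-- def escape_mdx_curly_braces(content: str) -> str:
--     """Escape {variable} in code blocks so MDX doesn't parse as JSX."""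
--     out = []
--     i = 0
--     n = len(content)
--     while i < n:
--         if content.startswith("{overrides}", i):
--             out.append("\\{overrides\\}")
--             i += 11
--         elif content.startswith("{config}", i):
--             out.append("\\{config\\}")
--             i += 8
--         else:
--             out.append(content[i])
--             i += 1
--     return "".join(out)
-- ===== Notes on version B (the rewrite author's own statement) =====
-- stated objective: alternative
-- what changed: Replaced A's two sequential full .replace passes with a single left-to-right scan that matches either pattern at each position and emits the escaped form directly, exploiting that the two patterns are disjoint.
import Mathlib
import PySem

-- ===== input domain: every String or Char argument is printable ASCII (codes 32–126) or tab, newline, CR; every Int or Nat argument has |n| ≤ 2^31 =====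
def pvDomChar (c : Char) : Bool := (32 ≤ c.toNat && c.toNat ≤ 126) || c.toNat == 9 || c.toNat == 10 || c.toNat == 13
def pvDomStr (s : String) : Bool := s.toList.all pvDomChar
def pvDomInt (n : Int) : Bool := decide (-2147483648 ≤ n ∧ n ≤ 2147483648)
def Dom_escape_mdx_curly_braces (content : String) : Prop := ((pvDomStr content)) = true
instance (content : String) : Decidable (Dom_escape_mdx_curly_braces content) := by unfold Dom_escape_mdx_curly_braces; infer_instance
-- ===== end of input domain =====

-- B replaces A's two sequential full .replace passes by a single left-to-right scan
-- that matches either pattern at each position (alternative decomposition, same cost).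

-- ===== PORT A =====
-- A loops over the replacement pairs, applying str.replace for each.
def escape_mdx_curly_braces (content : String) : String :=
  [("{overrides}", "\\{overrides\\}"), ("{config}", "\\{config\\}")].foldl
    (fun content p => PySem.Str.replace content p.1 p.2) content

-- ===== PORT B =====
-- B-side helper: the single-pass scanner from Source B's while-loop, as structural
-- recursion on the remaining suffix (i advancing = recursing on the dropped tail).
def pvOnePass : List Char → List Char
  | [] => []
  | c :: t =>
    if List.isPrefixOf ("{overrides}".toList) (c :: t) then
      "\\{overrides\\}".toList ++ pvOnePass (t.drop 10)
    else if List.isPrefixOf ("{config}".toList) (c :: t) then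
      "\\{config\\}".toList ++ pvOnePass (t.drop 7)
    else
      c :: pvOnePass t
termination_by l => l.length
decreasing_by all_goals (simp; try omega)

def escape_mdx_curly_braces_alt (content : String) : String :=
  String.ofList (pvOnePass content.toList)

-- ===== PRECONDITION & SPEC =====
def Spec_escape_mdx_curly_braces (content : String) (out : String) : Prop := out = escape_mdx_curly_braces_alt content
instance (content : String) (out : String) : Decidable (Spec_escape_mdx_curly_braces content out) := by unfold Spec_escape_mdx_curly_braces; infer_instance

-- ===== CLAIM (what is proved, stated in full; the proofs are below) =====
def Claim_equal_escape_mdx_curly_braces : Prop := ∀ (content : String), Dom_escape_mdx_curly_braces content → Spec_escape_mdx_curly_braces content (escape_mdx_curly_braces content)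

-- ===== LEMMAS AND PROOFS =====

-- Natural recursion equivalent to PySem.Chars.replace with a nonempty pattern o :: old'.
def pvRep (o : Char) (old' new : List Char) : List Char → List Char
  | [] => []
  | c :: t =>
    if List.isPrefixOf (o :: old') (c :: t) then
      new ++ pvRep o old' new (t.drop old'.length)
    else
      c :: pvRep o old' new t
termination_by l => l.length
decreasing_by all_goals (simp; try omega)

theorem pvGo_eq (o : Char) (old' new : List Char) :
    ∀ (fuel : Nat) (l acc : List Char), l.length ≤ fuel →
      PySem.Chars.replace.go (o :: old') new fuel l acc
        = acc.reverse ++ pvRep o old' new l := by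
  intro fuel
  induction fuel with
  | zero =>
    intro l acc h
    have : l = [] := List.eq_nil_of_length_eq_zero (Nat.le_zero.mp h)
    subst this
    simp [PySem.Chars.replace.go, pvRep]
  | succ n ih =>
    intro l acc h
    cases l with
    | nil => simp [PySem.Chars.replace.go, pvRep]
    | cons c t =>
      rw [PySem.Chars.replace.go]
      by_cases hp : List.isPrefixOf (o :: old') (c :: t) = true
      · rw [if_pos hp, pvRep, if_pos hp]
        have hd : List.drop (o :: old').length (c :: t) = t.drop old'.length := by
          simp [List.drop_succ_cons]
        rw [hd, ih _ _ (by simp at h ⊢; omega)]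
        simp
      · rw [if_neg hp, pvRep, if_neg hp]
        rw [ih _ _ (by simp at h; omega)]
        simp

theorem pvReplace_eq (o : Char) (old' new l : List Char) :
    PySem.Chars.replace l (o :: old') new = pvRep o old' new l := by
  rw [PySem.Chars.replace]
  simp only [List.isEmpty_cons, Bool.false_eq_true, if_false]
  exact (pvGo_eq o old' new l.length l [] le_rfl).trans (by simp)

-- abbreviations (proof-local)
def pvR1 : List Char → List Char := pvRep '{' "overrides}".toList "\\{overrides\\}".toList
def pvR2 : List Char → List Char := pvRep '{' "config}".toList "\\{config\\}".toList

-- replacing {overrides} leaves a leading {config}-block alone, step by step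
theorem pvR1_cfg (X : List Char) :
    pvR1 ("{config}".toList ++ X) = "{config}".toList ++ pvR1 X := by
  show pvR1 ('{'::'c'::'o'::'n'::'f'::'i'::'g'::'}'::X) = _
  rw [pvR1, pvRep, if_neg (by simp [List.isPrefixOf]),
      pvRep, if_neg (by simp [List.isPrefixOf]),
      pvRep, if_neg (by simp [List.isPrefixOf]),
      pvRep, if_neg (by simp [List.isPrefixOf]),
      pvRep, if_neg (by simp [List.isPrefixOf]),
      pvRep, if_neg (by simp [List.isPrefixOf]),
      pvRep, if_neg (by simp [List.isPrefixOf]),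
      pvRep, if_neg (by simp [List.isPrefixOf])]
  rfl

-- the {config}-pass passes over the escaped \{overrides\} block unchanged
theorem pvR2_eov (X : List Char) :
    pvR2 ("\\{overrides\\}".toList ++ X) = "\\{overrides\\}".toList ++ pvR2 X := by
  show pvR2 ('\\'::'{'::'o'::'v'::'e'::'r'::'r'::'i'::'d'::'e'::'s'::'\\'::'}'::X) = _
  rw [pvR2, pvRep, if_neg (by simp [List.isPrefixOf]),
      pvRep, if_neg (by simp [List.isPrefixOf]),
      pvRep, if_neg (by simp [List.isPrefixOf]),
      pvRep, if_neg (by simp [List.isPrefixOf]),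
      pvRep, if_neg (by simp [List.isPrefixOf]),
      pvRep, if_neg (by simp [List.isPrefixOf]),
      pvRep, if_neg (by simp [List.isPrefixOf]),
      pvRep, if_neg (by simp [List.isPrefixOf]),
      pvRep, if_neg (by simp [List.isPrefixOf]),
      pvRep, if_neg (by simp [List.isPrefixOf]),
      pvRep, if_neg (by simp [List.isPrefixOf]),
      pvRep, if_neg (by simp [List.isPrefixOf]),
      pvRep, if_neg (by simp [List.isPrefixOf])]
  rfl

-- a backslash-free prefix of pvR1 t is already a prefix of t
theorem pvPrefix_r1 : ∀ (t s : List Char), '\\' ∉ s → s <+: pvR1 t → s <+: t := by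
  intro t
  induction t using pvRep.induct '{' "overrides}".toList with
  | case1 =>
    intro s _ h
    simpa [pvR1, pvRep] using h
  | case2 c t hp ih =>
    intro s hs h
    rw [pvR1, pvRep, if_pos hp] at h
    cases s with
    | nil => exact List.nil_prefix
    | cons a s' =>
      exfalso
      obtain ⟨m, hm⟩ := h
      have : a = '\\' := by
        have := congrArg (fun l => l.head?) hm
        simpa using this
      exact hs (this ▸ List.mem_cons_self)
  | case3 c t hp ih =>
    intro s hs h
    rw [pvR1, pvRep, if_neg hp] at h
    cases s with
    | nil => exact List.nil_prefix
    | cons a s' =>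
      obtain ⟨m, hm⟩ := h
      obtain ⟨ha, hm'⟩ := List.cons.injEq .. ▸ hm
      have : s' <+: pvR1 t := ⟨m, hm'⟩
      have := ih s' (fun hmem => hs (List.mem_cons_of_mem _ hmem)) this
      exact List.cons_prefix_cons.mpr ⟨ha, this⟩

-- main lemma: the two-pass composition equals the single pass
theorem pvMain : ∀ (l : List Char), pvR2 (pvR1 l) = pvOnePass l := by
  intro l
  induction l using pvOnePass.induct with
  | case1 => simp [pvR1, pvR2, pvRep, pvOnePass]
  | case2 c t hov ih =>
    obtain ⟨m, hm⟩ := List.isPrefixOf_iff_prefix.mp hov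
    rw [pvOnePass, if_pos hov]
    have hmt : m = t.drop 10 := by
      have := congrArg (fun l => l.drop 11) hm
      simpa using this
    subst hmt
    rw [pvR1, pvRep,
        if_pos (show ('{' :: "overrides}".toList).isPrefixOf (c :: t) = true from hov)]
    have hd : ("overrides}".toList).length = 10 := by decide
    rw [hd]
    show pvR2 ("\\{overrides\\}".toList ++ pvR1 (t.drop 10)) = _
    rw [pvR2_eov, ih]
  | case3 c t hov hcfg ih =>
    obtain ⟨m, hm⟩ := List.isPrefixOf_iff_prefix.mp hcfg
    rw [pvOnePass, if_neg hov, if_pos hcfg]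
    have hmt : m = t.drop 7 := by
      have := congrArg (fun l => l.drop 8) hm
      simpa using this
    subst hmt
    rw [← hm, pvR1_cfg]
    show pvR2 ('{'::'c'::'o'::'n'::'f'::'i'::'g'::'}'::(pvR1 (t.drop 7))) = _
    rw [pvR2, pvRep, if_pos (by simp [List.isPrefixOf])]
    have : ("config}".toList).length = 7 := by decide
    show "\\{config\\}".toList ++
        pvRep '{' "config}".toList "\\{config\\}".toList
          (('c'::'o'::'n'::'f'::'i'::'g'::'}'::(pvR1 (t.drop 7))).drop ("config}".toList).length)
        = _
    rw [this]
    show "\\{config\\}".toList ++ pvR2 (pvR1 (t.drop 7)) = _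
    rw [ih]
  | case4 c t hov hcfg ih =>
    rw [pvOnePass, if_neg hov, if_neg hcfg]
    rw [pvR1, pvRep,
        if_neg (show ¬ (('{' :: "overrides}".toList).isPrefixOf (c :: t) = true) from hov)]
    rw [show pvRep '{' "overrides}".toList "\\{overrides\\}".toList t = pvR1 t from rfl]
    have hnc : ¬ List.isPrefixOf ("{config}".toList) (c :: pvR1 t) = true := by
      intro h
      obtain ⟨m, hm⟩ := List.isPrefixOf_iff_prefix.mp h
      apply hcfg
      have hc : c = '{' := by
        have := congrArg (fun l => l.head?) hm
        simpa using this.symm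
      have hpre : "config}".toList <+: pvR1 t := by
        refine ⟨m, ?_⟩
        have := congrArg (fun l => l.tail) hm
        simpa using this
      have := pvPrefix_r1 t "config}".toList (by decide) hpre
      obtain ⟨m', hm'⟩ := this
      apply List.isPrefixOf_iff_prefix.mpr
      exact ⟨m', by rw [hc]; simpa using congrArg (fun l => '{' :: l) hm'⟩
    rw [pvR2, pvRep,
        if_neg (show ¬ (('{' :: "config}".toList).isPrefixOf (c :: pvR1 t) = true) from hnc)]
    show c :: pvR2 (pvR1 t) = _
    rw [ih]

-- ===== VERDICT (by name: the statement is the Claim_ definition above) =====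
theorem escape_mdx_curly_braces_spec : Claim_equal_escape_mdx_curly_braces := by
  intro content _
  show _ = _
  unfold escape_mdx_curly_braces escape_mdx_curly_braces_alt
  simp only [List.foldl]
  apply String.toList_injective
  rw [PySem.Str.toList_replace, PySem.Str.toList_replace]
  show PySem.Chars.replace
      (PySem.Chars.replace content.toList ("{overrides}".toList) ("\\{overrides\\}".toList))
      ("{config}".toList) ("\\{config\\}".toList) = _
  rw [show ("{overrides}".toList) = '{' :: "overrides}".toList from rfl,
      show ("{config}".toList) = '{' :: "config}".toList from rfl,
      pvReplace_eq, pvReplace_eq]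
  rw [show pvRep '{' "config}".toList "\\{config\\}".toList
        (pvRep '{' "overrides}".toList "\\{overrides\\}".toList content.toList)
      = pvR2 (pvR1 content.toList) from rfl]
  rw [pvMain]
  simp
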